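-- pv_equiv track=rewrite | github.com/rsbyrne/planetengine | ascii/asciiraster.py | prettify
-- ===== SOURCE A (Python) =====
-- def prettify(string):
--     prettyStr = ''
--     for character in string:
--         if character == '\n':
--             prettyStr += '\n'
--         else:
--             prettyStr += character * 2
--     return prettyStr
-- ===== SOURCE B (Python) =====
-- def prettify(string):
--     return '\n'.join(''.join(c * 2 for c in seg) for seg in string.split('\n'))
-- ===== Notes on version B (the rewrite author's own statement) =====
-- stated objective: idiomatic
-- what changed: Replaces the per-character newline branch in a single accumulating loop by delimiter-based decomposition: split the string on the newline character, double every character within each segment, and rejoin the segments with newlines.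
import Mathlib
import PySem

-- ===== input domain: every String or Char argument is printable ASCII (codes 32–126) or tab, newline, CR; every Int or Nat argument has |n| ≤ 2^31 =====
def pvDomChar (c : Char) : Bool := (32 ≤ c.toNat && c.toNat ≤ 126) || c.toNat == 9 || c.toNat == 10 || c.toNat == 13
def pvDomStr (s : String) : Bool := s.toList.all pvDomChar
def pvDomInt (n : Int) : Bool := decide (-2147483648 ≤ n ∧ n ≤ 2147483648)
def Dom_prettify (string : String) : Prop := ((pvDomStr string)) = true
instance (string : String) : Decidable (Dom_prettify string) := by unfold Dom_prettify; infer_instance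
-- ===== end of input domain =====

-- B doubles every non-newline character by splitting on '\n', doubling within segments and rejoining,
-- instead of A's per-character branch in a single accumulating loop (objective: idiomatic; no speed claim).

-- ===== PORT A =====
-- A: one pass, appending '\n' for a newline and the character twice otherwise.
def prettify (string : String) : String :=
  String.mk (string.toList.foldl
    (fun prettyStr character =>
      if character = '\n' then prettyStr ++ ['\n'] else prettyStr ++ [character, character]) [])

-- ===== PORT B =====
-- B: split on '\n' (Python str.split with a one-char separator = List.splitOn on the char list),
-- double every char inside each segment, rejoin with '\n' (Python str.join = List.intercalate).
def prettify_alt (string : String) : String :=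
  String.mk (List.intercalate ['\n']
    ((string.toList.splitOn '\n').map (fun seg => seg.flatMap (fun c => [c, c]))))

-- ===== PRECONDITION & SPEC =====
def Spec_prettify (string : String) (out : String) : Prop := out = prettify_alt string
instance (string : String) (out : String) : Decidable (Spec_prettify string out) := by unfold Spec_prettify; infer_instance

-- ===== CLAIM (what is proved, stated in full; the proofs are below) =====
def Claim_equal_prettify : Prop := ∀ (string : String), Dom_prettify string → Spec_prettify string (prettify string)

-- ===== LEMMAS AND PROOFS =====

-- A's accumulating loop written as a flatMap (invariant of the accumulator).
theorem foldl_double_step (l : List Char) (acc : List Char) :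
    l.foldl (fun prettyStr character =>
        if character = '\n' then prettyStr ++ ['\n'] else prettyStr ++ [character, character]) acc
      = acc ++ l.flatMap (fun c => if c = '\n' then ['\n'] else [c, c]) := by
  induction l generalizing acc with
  | nil => simp
  | cons c l ih => by_cases hc : c = '\n' <;> simp [hc, ih]

-- B's split/double/join pipeline equals the same flatMap.
theorem intercalate_splitOn_double (l : List Char) :
    List.intercalate ['\n'] ((l.splitOn '\n').map (fun seg => seg.flatMap (fun c => [c, c])))
      = l.flatMap (fun c => if c = '\n' then ['\n'] else [c, c]) := by
  induction l with
  | nil => simp [List.splitOn, List.intercalate]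
  | cons c l ih =>
    obtain ⟨h, t, hspl⟩ : ∃ h t, l.splitOn '\n' = h :: t := by
      rcases e : l.splitOn '\n' with _ | ⟨h, t⟩
      · exact absurd e (List.splitOnP_ne_nil _ _)
      · exact ⟨h, t, rfl⟩
    have hspl' : List.splitOnP (fun x => x == '\n') l = h :: t := hspl
    rw [hspl] at ih
    by_cases hc : c = '\n'
    · subst hc
      have hs : ('\n' :: l).splitOn '\n' = [] :: h :: t := by
        simp [List.splitOn, List.splitOnP_cons, ← hspl]
      rw [hs]
      simp only [List.map_cons, List.flatMap_nil, List.flatMap_cons]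
      rw [show (['\n'].intercalate ([] :: (fun seg => List.flatMap (fun c => [c, c]) seg) h ::
            t.map (fun seg => seg.flatMap (fun c => [c, c])))) =
          [] ++ ['\n'] ++ ['\n'].intercalate ((h :: t).map (fun seg => seg.flatMap (fun c => [c, c]))) from by
        simp [List.intercalate]]
      simpa using ih
    · have hs : (c :: l).splitOn '\n' = (c :: h) :: t := by
        simp only [List.splitOn, List.splitOnP_cons, hc, beq_iff_eq, if_false, hspl',
          List.modifyHead]
      rw [hs]
      simp only [List.map_cons, List.flatMap_cons, if_neg hc]
      cases t with
      | nil => simp [List.intercalate] at ih ⊢; simp [ih]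
      | cons y ys =>
        simp [List.intercalate] at ih ⊢
        simp [ih]

-- ===== VERDICT (by name: the statement is the Claim_ definition above) =====
theorem prettify_spec : Claim_equal_prettify := by
  intro s _
  unfold Spec_prettify prettify prettify_alt
  rw [intercalate_splitOn_double, foldl_double_step]
  simp
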